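-- pv_equiv track=rewrite | github.com/nguyenlinhlinh/adventofcode-2022 | 23/solution-23-part2.py | getAdjcentElvesIdx
-- ===== SOURCE A (Python) =====
-- def getAdjcentElvesIdx(pos, elfPositions):
--     (r, c) = pos
--     #                   N           NE              E           SE              S               SW          W           NW
--     directions = [(r - 1, c), (r - 1, c + 1), (r, c + 1), (r + 1, c + 1),   (r + 1, c), (r + 1, c - 1), (r, c - 1), (r - 1, c- 1)]
--     elfPos = set()
--     for dir in directions:
--         try:
--             idx = elfPositions.index(dir)
--             elfPos.add(idx)
--         except ValueError:
--             continue
--     return elfPos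
-- ===== SOURCE B (Python) =====
-- def getAdjcentElvesIdx(pos, elfPositions):
--     (r, c) = pos
--     directions = [(r - 1, c), (r - 1, c + 1), (r, c + 1), (r + 1, c + 1),
--                   (r + 1, c), (r + 1, c - 1), (r, c - 1), (r - 1, c - 1)]
--     # one pass over the elf list, keeping the first index found for each of the 8 slots
--     found = [None] * 8
--     for i, p in enumerate(elfPositions):
--         for k in range(8):
--             if found[k] is None and p == directions[k]:
--                 found[k] = i
--     return {i for i in found if i is not None}
-- ===== Notes on version B (the rewrite author's own statement) =====
-- stated objective: alternative
-- what changed: Instead of eight separate list.index scans, B makes a single pass over elfPositions with an accumulator of 8 first-found index slots (earliest index wins per slot) and assembles the set from the slots at the end.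
import Mathlib
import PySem

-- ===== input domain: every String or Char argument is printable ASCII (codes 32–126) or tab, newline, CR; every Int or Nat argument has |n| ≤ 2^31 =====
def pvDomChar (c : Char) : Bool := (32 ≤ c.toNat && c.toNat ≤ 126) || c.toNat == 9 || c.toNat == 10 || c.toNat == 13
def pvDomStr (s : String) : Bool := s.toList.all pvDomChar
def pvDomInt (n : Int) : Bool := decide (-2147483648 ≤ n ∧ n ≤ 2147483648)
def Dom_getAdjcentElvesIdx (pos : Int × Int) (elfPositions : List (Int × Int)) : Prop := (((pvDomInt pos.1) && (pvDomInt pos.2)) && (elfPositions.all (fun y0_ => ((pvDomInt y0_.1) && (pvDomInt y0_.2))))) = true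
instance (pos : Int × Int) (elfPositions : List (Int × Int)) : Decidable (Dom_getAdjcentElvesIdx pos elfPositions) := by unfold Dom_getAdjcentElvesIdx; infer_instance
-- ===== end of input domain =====

-- B replaces A's eight separate list.index scans by a single pass over elfPositions that fills
-- an 8-slot accumulator of first-found indices, building the set from the slots at the end.

-- ===== PORT A =====
def getAdjcentElvesIdx (pos : Int × Int) (elfPositions : List (Int × Int)) : List Int :=
  let r := pos.1
  let c := pos.2
  let directions : List (Int × Int) :=
    [(r - 1, c), (r - 1, c + 1), (r, c + 1), (r + 1, c + 1), (r + 1, c), (r + 1, c - 1), (r, c - 1), (r - 1, c - 1)]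
  directions.foldl (fun elfPos dir =>
    match PySem.List.index? elfPositions dir with
    | some idx => PySem.Set.add elfPos (idx : Int)   -- try: index, add
    | none => elfPos)                                -- except ValueError: continue
    PySem.Set.empty

-- ===== PORT B =====
-- inner loop 'for k in range(8): if found[k] is None and p == directions[k]: found[k] = i',
-- ported as a simultaneous walk over the slot list and the direction list (exact elementwise update)
def pvUpdateSlots (found : List (Option Int)) (directions : List (Int × Int)) (i : Int) (p : Int × Int) : List (Option Int) :=
  match found, directions with
  | [], _ => []
  | f, [] => f
  | s :: f, d :: ds => (if s = none ∧ p = d then some i else s) :: pvUpdateSlots f ds i p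

def getAdjcentElvesIdx_alt (pos : Int × Int) (elfPositions : List (Int × Int)) : List Int :=
  let r := pos.1
  let c := pos.2
  let directions : List (Int × Int) :=
    [(r - 1, c), (r - 1, c + 1), (r, c + 1), (r + 1, c + 1), (r + 1, c), (r + 1, c - 1), (r, c - 1), (r - 1, c - 1)]
  let found : List (Option Int) :=
    (PySem.List.enumerate elfPositions 0).foldl
      (fun f ip => pvUpdateSlots f directions ip.1 ip.2) (List.replicate 8 none)
  found.foldl (fun res s =>
    match s with
    | some i => PySem.Set.add res i
    | none => res) PySem.Set.empty

-- ===== PRECONDITION & SPEC =====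
def Spec_getAdjcentElvesIdx (pos : Int × Int) (elfPositions : List (Int × Int)) (out : List Int) : Prop := out = getAdjcentElvesIdx_alt pos elfPositions
instance (pos : Int × Int) (elfPositions : List (Int × Int)) (out : List Int) : Decidable (Spec_getAdjcentElvesIdx pos elfPositions out) := by unfold Spec_getAdjcentElvesIdx; infer_instance

-- ===== CLAIM (what is proved, stated in full; the proofs are below) =====
def Claim_equal_getAdjcentElvesIdx : Prop := ∀ (pos : Int × Int) (elfPositions : List (Int × Int)), Dom_getAdjcentElvesIdx pos elfPositions → Spec_getAdjcentElvesIdx pos elfPositions (getAdjcentElvesIdx pos elfPositions)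

-- ===== LEMMAS AND PROOFS =====

-- Specification of the slot accumulator after scanning xs starting at counter s:
-- each slot keeps its value if already filled, else takes the first index of its direction in xs.
def pvMerge : List (Option Int) → List (Int × Int) → List (Int × Int) → Int → List (Option Int)
  | [], _, _, _ => []
  | f, [], _, _ => f
  | o :: f, d :: ds, xs, s =>
      (match o with
       | some w => some w
       | none => (PySem.List.index? xs d).map (fun k => s + (k : Int))) :: pvMerge f ds xs s

theorem pvMerge_nil (f : List (Option Int)) (ds : List (Int × Int)) (s : Int) :
    pvMerge f ds [] s = f := by
  induction f generalizing ds with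
  | nil => cases ds <;> rfl
  | cons o f ih =>
      cases ds with
      | nil => rfl
      | cons d ds =>
          simp only [pvMerge, ih]
          cases o <;> simp [PySem.List.index?_eq_idxOf?]

theorem pvMerge_update (f : List (Option Int)) (ds : List (Int × Int)) (xs : List (Int × Int))
    (i : Int) (p : Int × Int) :
    pvMerge (pvUpdateSlots f ds i p) ds xs (i + 1) = pvMerge f ds (p :: xs) i := by
  induction f generalizing ds with
  | nil => cases ds <;> rfl
  | cons o f ih =>
      cases ds with
      | nil => rfl
      | cons d ds =>
          simp only [pvUpdateSlots, pvMerge]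
          rw [ih]
          congr 1
          cases o with
          | some w => rfl
          | none =>
              by_cases hpd : p = d
              · subst hpd
                rw [if_pos ⟨rfl, rfl⟩, PySem.List.index?_cons_self]
                simp
              · rw [if_neg (by simp [hpd]), PySem.List.index?_cons_of_ne _ hpd]
                show _ = Option.map _ _
                cases h2 : PySem.List.index? xs d <;> simp
                ring

theorem pvPass_eq (ds : List (Int × Int)) (xs : List (Int × Int)) (s : Int) (f : List (Option Int)) :
    (PySem.List.enumerate xs s).foldl (fun f ip => pvUpdateSlots f ds ip.1 ip.2) f
      = pvMerge f ds xs s := by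
  induction xs generalizing s f with
  | nil => simp [PySem.List.enumerate_nil, pvMerge_nil]
  | cons x xs ih =>
      rw [PySem.List.enumerate_cons]
      simp only [List.foldl_cons]
      rw [ih, pvMerge_update]

theorem pvMerge_replicate (ds : List (Int × Int)) (xs : List (Int × Int)) (s : Int) :
    pvMerge (List.replicate ds.length none) ds xs s
      = ds.map (fun d => (PySem.List.index? xs d).map (fun k => s + (k : Int))) := by
  induction ds with
  | nil => rfl
  | cons d ds ih => simp only [List.length_cons, List.replicate_succ, pvMerge, List.map_cons, ih]

-- ===== VERDICT (by name: the statement is the Claim_ definition above) =====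
theorem getAdjcentElvesIdx_spec : Claim_equal_getAdjcentElvesIdx := by
  intro pos elfPositions _
  unfold Spec_getAdjcentElvesIdx getAdjcentElvesIdx getAdjcentElvesIdx_alt
  simp only []
  rw [pvPass_eq]
  rw [show (List.replicate 8 (none : Option Int))
        = List.replicate ([((pos.1:Int) - 1, pos.2), (pos.1 - 1, pos.2 + 1), (pos.1, pos.2 + 1),
            (pos.1 + 1, pos.2 + 1), (pos.1 + 1, pos.2), (pos.1 + 1, pos.2 - 1), (pos.1, pos.2 - 1),
            (pos.1 - 1, pos.2 - 1)] : List (Int × Int)).length none from rfl]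
  rw [pvMerge_replicate, List.foldl_map]
  congr 1
  funext res d
  cases h : PySem.List.index? elfPositions d <;> simp
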